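-- pv_equiv track=rewrite | github.com/tomasvalik/APRG_projekt3.3 | verze_zviratka.py | two_letter_change
-- ===== SOURCE A (Python) =====
-- from math import floor, ceil
--
-- def sorting_function(neroztrideny_seznam_slov):
--     return sorted(neroztrideny_seznam_slov, key=str.lower)
--
-- def porovnani(slovo, seznam_slov):
--     if len(seznam_slov) < 1:
--         return []
--     elif len(seznam_slov) == 1:
--         if slovo == seznam_slov[0]:
--             return seznam_slov[0]
--     elif len(seznam_slov) > 1:
--         if slovo == seznam_slov[(floor((len(seznam_slov))/2))]:
--             return seznam_slov[(floor((len(seznam_slov))/2))]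
--         else:
--             por = sorting_function([slovo, seznam_slov[floor((len(seznam_slov))/2)]])
--             if slovo == por[0]:
--                 vys = porovnani(slovo, seznam_slov[:(floor(len(seznam_slov) / 2))])
--                 return vys
--             elif slovo == por[1]:
--                 vys = porovnani(slovo, seznam_slov[((floor(len(seznam_slov) / 2))+1):])
--                 return vys
--
-- def pridani_do_seznamu(co, kam):
--     if co != None:
--         if co != []:
--             if co not in kam:
--                 kam.append(co)
--
-- def two_letter_change(slovo, knihovna, kam):
--     vysledek_two_letter_change = []
--     index = 0
--     while (index + 1) < len(slovo):
--         t = list(slovo)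
--         u = t.pop(index)
--         t.insert(index + 1, u)
--         v = ""
--         for k in t:
--             v = v + k
--         w = porovnani(v, knihovna)
--         pridani_do_seznamu(w, kam)
--         index = index + 1
--     return kam
-- ===== SOURCE B (Python) =====
-- def two_letter_change(slovo, knihovna, kam):
--     # NOTE: like the original, this appends the found words to `kam` in place and returns it.
--     n = len(knihovna)
--     for i in range(len(slovo) - 1):
--         v = slovo[:i] + slovo[i + 1] + slovo[i] + slovo[i + 2:]
--         lo, hi = 0, n
--         w = None
--         while hi - lo > 1:
--             mid = lo + (hi - lo) // 2
--             if v == knihovna[mid]: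
--                 w = knihovna[mid]
--                 break
--             if v.lower() <= knihovna[mid].lower():
--                 hi = mid
--             else:
--                 lo = mid + 1
--         else:
--             if hi - lo == 1 and v == knihovna[lo]:
--                 w = knihovna[lo]
--         if w is not None and w not in kam:
--             kam.append(w)
--     return kam
-- ===== Notes on version B (the rewrite author's own statement) =====
-- stated objective: faster
-- what changed: Replaces the recursive binary search that copies list slices at every level (and the pop/insert/char-by-char rebuild of each swapped word) with an iterative index-based binary search over [lo,hi) and direct string slicing, making the same comparison decisions without copying the library.
import Mathlib
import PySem

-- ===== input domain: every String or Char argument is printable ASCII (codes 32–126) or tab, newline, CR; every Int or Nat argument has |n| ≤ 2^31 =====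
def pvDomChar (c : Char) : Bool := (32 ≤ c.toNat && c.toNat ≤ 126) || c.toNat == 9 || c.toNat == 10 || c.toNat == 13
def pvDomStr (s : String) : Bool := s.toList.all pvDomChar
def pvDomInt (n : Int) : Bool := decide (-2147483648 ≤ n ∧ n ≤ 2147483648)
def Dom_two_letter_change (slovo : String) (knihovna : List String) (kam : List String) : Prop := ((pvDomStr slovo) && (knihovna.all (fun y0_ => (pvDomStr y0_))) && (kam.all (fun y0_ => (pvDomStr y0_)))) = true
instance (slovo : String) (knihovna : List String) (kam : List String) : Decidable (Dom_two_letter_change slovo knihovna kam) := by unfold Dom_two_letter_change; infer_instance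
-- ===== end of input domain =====

-- B replaces A's slice-copying recursive binary search (and the pop/insert/char-by-char rebuild of each
-- swapped word) with an iterative index-based binary search and direct slicing; same decisions, same result.
-- Both Pythons append the found words to `kam` IN PLACE and return it: the theorems are about the return value.

-- ===== PORT A =====
-- Python's porovnani returns [] (empty list), a string, or None; modelled by a three-way sum.
inductive PorRes where
  | pyNone : PorRes
  | pyEmptyList : PorRes
  | pyStr : String → PorRes
deriving DecidableEq, Repr

-- sorted(l, key=str.lower); keys compared as lowered char lists (Python's lexicographic string order)
def sorting_function (l : List String) : List String :=
  PySem.List.sorted l (fun s => PySem.Chars.lower s.toList)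

def porovnani (slovo : String) (seznam_slov : List String) : PorRes :=
  if seznam_slov.length < 1 then .pyEmptyList
  else if seznam_slov.length = 1 then
    (if slovo == PySem.List.pyGetD seznam_slov 0 "" then .pyStr (PySem.List.pyGetD seznam_slov 0 "")
     else .pyNone)  -- Python falls off the function: None
  else
    let m : Int := PySem.Int.floordiv (seznam_slov.length : Int) 2
    if slovo == PySem.List.pyGetD seznam_slov m "" then .pyStr (PySem.List.pyGetD seznam_slov m "")
    else
      let por := sorting_function [slovo, PySem.List.pyGetD seznam_slov m ""]
      if slovo == PySem.List.pyGetD por 0 "" then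
        porovnani slovo (PySem.List.slice seznam_slov none (some m))
      else if slovo == PySem.List.pyGetD por 1 "" then
        porovnani slovo (PySem.List.slice seznam_slov (some (m + 1)) none)
      else .pyNone  -- Python falls off the function: None
termination_by seznam_slov.length
decreasing_by
  · have h2 : 2 ≤ seznam_slov.length := by omega
    have hm : PySem.Int.floordiv (seznam_slov.length : Int) 2 = ((seznam_slov.length / 2 : Nat) : Int) := by
      exact_mod_cast PySem.Int.floordiv_natCast seznam_slov.length 2
    rw [hm, PySem.List.slice_to_natCast, List.length_take]
    omega
  · have h2 : 2 ≤ seznam_slov.length := by omega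
    have hm : PySem.Int.floordiv (seznam_slov.length : Int) 2 = ((seznam_slov.length / 2 : Nat) : Int) := by
      exact_mod_cast PySem.Int.floordiv_natCast seznam_slov.length 2
    have : PySem.Int.floordiv (seznam_slov.length : Int) 2 + 1 = ((seznam_slov.length / 2 + 1 : Nat) : Int) := by
      rw [hm]; push_cast; ring
    rw [this, PySem.List.slice_from_natCast, List.length_drop]
    omega

def pridani_do_seznamu (co : PorRes) (kam : List String) : List String :=
  match co with
  | .pyNone => kam        -- co == None: skipped
  | .pyEmptyList => kam   -- co == []: skipped
  | .pyStr s => if s ∈ kam then kam else kam ++ [s]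

def two_letter_change (slovo : String) (knihovna : List String) (kam : List String) : List String :=
  -- vysledek_two_letter_change = [] is dead in the Python; the while loop is range(len(slovo)-1)
  (PySem.List.pyRange 0 (PySem.Str.len slovo - 1) 1).foldl (fun kam index =>
    let t := slovo.toList
    match PySem.List.pop? t index with
    | none => kam  -- unreachable: 0 ≤ index < len(slovo)
    | some (u, t) =>
      let t := PySem.List.insert t (index + 1) u
      let v := t.foldl (fun v k => v ++ [k]) ([] : List Char)
      let w := porovnani (String.ofList v) knihovna
      pridani_do_seznamu w kam) kam

-- ===== PORT B =====
-- Python's v.lower() <= x.lower(): <= on strings is the total lexicographic order, i.e. not (x < v)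
def pyLeChars (a b : List Char) : Bool := !(decide (b < a))

def tlcSearch (v : String) (knihovna : List String) (lo hi : Nat) : Option String :=
  if 1 < hi - lo then
    let mid := lo + (hi - lo) / 2
    let x := knihovna.getD mid ""
    if v == x then some x
    else if pyLeChars (PySem.Chars.lower v.toList) (PySem.Chars.lower x.toList) then
      tlcSearch v knihovna lo mid
    else
      tlcSearch v knihovna (mid + 1) hi
  else if hi - lo == 1 && v == knihovna.getD lo "" then some (knihovna.getD lo "") else none
termination_by hi - lo
decreasing_by all_goals omega

def two_letter_change_alt (slovo : String) (knihovna : List String) (kam : List String) : List String :=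
  let cs := slovo.toList
  (List.range (cs.length - 1)).foldl (fun kam i =>
    -- slovo[:i] + slovo[i+1] + slovo[i] + slovo[i+2:]; exact as take/getD/drop for these in-range indices
    let v := String.ofList (cs.take i ++ [cs.getD (i + 1) ' ', cs.getD i ' '] ++ cs.drop (i + 2))
    match tlcSearch v knihovna 0 knihovna.length with
    | some w => if w ∈ kam then kam else kam ++ [w]
    | none => kam) kam

-- ===== PRECONDITION & SPEC =====
def Spec_two_letter_change (slovo : String) (knihovna : List String) (kam : List String) (out : List String) : Prop := out = two_letter_change_alt slovo knihovna kam
instance (slovo : String) (knihovna : List String) (kam : List String) (out : List String) : Decidable (Spec_two_letter_change slovo knihovna kam out) := by unfold Spec_two_letter_change; infer_instance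

-- ===== CLAIM (what is proved, stated in full; the proofs are below) =====
def Claim_equal_two_letter_change : Prop := ∀ (slovo : String) (knihovna : List String) (kam : List String), Dom_two_letter_change slovo knihovna kam → Spec_two_letter_change slovo knihovna kam (two_letter_change slovo knihovna kam)

-- ===== LEMMAS AND PROOFS =====

def porToOpt (r : PorRes) : Option String :=
  match r with
  | .pyStr s => some s
  | _ => none

theorem pridani_eq_match (co : PorRes) (kam : List String) :
    pridani_do_seznamu co kam =
      match porToOpt co with
      | some w => if w ∈ kam then kam else kam ++ [w]
      | none => kam := by
  cases co <;> rfl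

-- two-element stable sort by lowered key
theorem sorting_function_pair (a b : String) :
    sorting_function [a, b] =
      if PySem.Chars.lower b.toList < PySem.Chars.lower a.toList then [b, a] else [a, b] := by
  rw [sorting_function, PySem.List.sorted_eq_foldl_insertBy]
  simp [PySem.List.insertBy]

-- the heart: A's recursive slicing search on the segment [lo, hi) equals B's index search
theorem porovnani_eq_tlcSearch (v : String) (knihovna : List String) :
    ∀ (n lo hi : Nat), hi - lo = n → lo ≤ hi → hi ≤ knihovna.length →
      porToOpt (porovnani v ((knihovna.drop lo).take (hi - lo))) = tlcSearch v knihovna lo hi := by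
  intro n
  induction n using Nat.strong_induction_on with
  | _ n IH =>
  intro lo hi hn hle hhi
  set l := (knihovna.drop lo).take (hi - lo) with hl
  have hlen : l.length = hi - lo := by
    simp only [hl, List.length_take, List.length_drop]; omega
  have hseg : ∀ (k : Nat) (hk : k < hi - lo), l[k]'(by omega) = knihovna[lo + k]'(by omega) := by
    intro k hk
    simp only [hl, List.getElem_take, List.getElem_drop]
  rw [porovnani, tlcSearch]
  rcases Nat.lt_or_ge n 2 with h2 | h2
  · interval_cases n
    · -- empty segment
      have hl0 : l.length < 1 := by omega
      rw [if_pos hl0]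
      have hgt : ¬ (1 : Nat) < hi - lo := by omega
      rw [if_neg hgt]
      have : (hi - lo == 1) = false := by simp; omega
      simp [this, porToOpt]
    · -- one-element segment
      have hlo : lo < knihovna.length := by omega
      have h1 : ¬ l.length < 1 := by omega
      have he : l.length = 1 := by omega
      rw [if_neg h1, if_pos he]
      have hget : PySem.List.pyGetD l 0 "" = knihovna[lo] := by
        rw [PySem.List.pyGetD_eq_getElem l "" (by norm_num) (by omega)]
        have := hseg 0 (by omega)
        simpa using this
      have hgetD : knihovna.getD lo "" = knihovna[lo] := List.getD_eq_getElem _ _ hlo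
      have hgt : ¬ (1 : Nat) < hi - lo := by omega
      rw [hget, if_neg hgt, hgetD]
      have h11 : (hi - lo == 1) = true := by simp; omega
      by_cases hv : (v == knihovna[lo]) = true
      · simp [hv, h11, porToOpt]
      · simp only [Bool.not_eq_true] at hv
        simp [hv, h11, porToOpt]
  · -- segment of length ≥ 2
    have h1 : ¬ l.length < 1 := by omega
    have hne1 : ¬ l.length = 1 := by omega
    set q : Nat := (hi - lo) / 2 with hqdef
    have hq : PySem.Int.floordiv (l.length : Int) 2 = ((q : Nat) : Int) := by
      rw [hlen, hqdef]; exact_mod_cast PySem.Int.floordiv_natCast (hi - lo) 2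
    have hqlt : q < hi - lo := by omega
    set mid : Nat := lo + q with hmid
    have hmidlt : mid < knihovna.length := by omega
    have hgetm : PySem.List.pyGetD l ((q : Nat) : Int) "" = knihovna[mid] := by
      rw [PySem.List.pyGetD_eq_getElem l "" (by omega) (by omega)]
      have := hseg q hqlt
      simpa [hmid] using this
    have hgetDm : knihovna.getD mid "" = knihovna[mid] := List.getD_eq_getElem _ _ hmidlt
    have hgt : (1 : Nat) < hi - lo := by omega
    have hmid' : lo + (hi - lo) / 2 = mid := by omega
    rw [if_neg h1, if_neg hne1, if_pos hgt]
    simp only [hq, hgetm, hgetDm]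
    by_cases hv : (v == knihovna[mid]) = true
    · simp [hv, porToOpt]
    · simp only [Bool.not_eq_true] at hv
      rw [hv]
      simp only [Bool.false_eq_true, if_false]
      have hvne : v ≠ knihovna[mid] := by
        intro h; rw [h] at hv; simp at hv
      rw [sorting_function_pair]
      -- the left slice of l
      have hslL : PySem.List.slice l none (some ((q : Nat) : Int)) =
          (knihovna.drop lo).take (mid - lo) := by
        rw [PySem.List.slice_to_natCast, hl, List.take_take]
        have : min q (hi - lo) = mid - lo := by omega
        rw [this]
      -- the right slice of l
      have hslR : PySem.List.slice l (some (((q : Nat) : Int) + 1)) none =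
          (knihovna.drop (mid + 1)).take (hi - (mid + 1)) := by
        have hc : ((q : Nat) : Int) + 1 = (((q + 1 : Nat)) : Int) := by push_cast; ring
        rw [hc, PySem.List.slice_from_natCast, hl, List.drop_take, List.drop_drop]
        have h3 : lo + (q + 1) = mid + 1 := by omega
        have h4 : hi - lo - (q + 1) = hi - (mid + 1) := by omega
        rw [h3, h4]
      by_cases hlt : PySem.Chars.lower (knihovna[mid]).toList < PySem.Chars.lower v.toList
      · -- v goes right: por = [knihovna[mid], v]
        rw [if_pos hlt]
        have hp0 : PySem.List.pyGetD [knihovna[mid], v] 0 "" = knihovna[mid] := rfl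
        have hp1 : PySem.List.pyGetD [knihovna[mid], v] 1 "" = v := rfl
        rw [hp0, hv]
        simp only [Bool.false_eq_true, if_false, hp1, beq_self_eq_true, if_true]
        have hle' : pyLeChars (PySem.Chars.lower v.toList) (PySem.Chars.lower (knihovna[mid]).toList) = false := by
          simp [pyLeChars, hlt]
        rw [hle']
        simp only [Bool.false_eq_true, if_false]
        rw [hslR]
        exact IH (hi - (mid + 1)) (by omega) (mid + 1) hi rfl (by omega) hhi
      · -- v goes left: por = [v, knihovna[mid]]
        rw [if_neg hlt]
        have hp0 : PySem.List.pyGetD [v, knihovna[mid]] 0 "" = v := rfl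
        rw [hp0]
        simp only [beq_self_eq_true, if_true]
        have hle' : pyLeChars (PySem.Chars.lower v.toList) (PySem.Chars.lower (knihovna[mid]).toList) = true := by
          simp [pyLeChars, hlt]
        rw [hle', if_pos rfl]
        rw [hslL]
        have := IH (mid - lo) (by omega) lo mid rfl (by omega) (by omega)
        simpa using this

theorem porovnani_eq_tlcSearch_full (v : String) (knihovna : List String) :
    porToOpt (porovnani v knihovna) = tlcSearch v knihovna 0 knihovna.length := by
  have := porovnani_eq_tlcSearch v knihovna knihovna.length 0 knihovna.length rfl (by omega) le_rfl
  simpa using this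

-- the swapped word built by pop/insert/rebuild equals the sliced form
theorem swap_word_eq (cs : List Char) (j : Nat) (hj : j + 1 < cs.length) :
    (PySem.List.insert (cs.eraseIdx j) ((j : Int) + 1) (cs[j]'(by omega))).foldl
        (fun v k => v ++ [k]) ([] : List Char)
    = cs.take j ++ [cs.getD (j + 1) ' ', cs.getD j ' '] ++ cs.drop (j + 2) := by
  rw [PySem.List.foldl_append_singleton_eq_self, List.nil_append]
  have hcast : ((j : Int) + 1) = (((j + 1 : Nat)) : Int) := by push_cast; ring
  have hlen : (cs.eraseIdx j).length = cs.length - 1 := by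
    rw [List.length_eraseIdx_of_lt (by omega)]
  rw [hcast, PySem.List.insert_natCast _ _ _ (by omega)]
  rw [List.eraseIdx_eq_take_drop_succ]
  have htj : (cs.take j).length = j := List.length_take_of_le (by omega)
  have hdropc : cs.drop (j + 1) = (cs[j+1]'(by omega)) :: cs.drop (j + 2) := by
    rw [List.drop_eq_getElem_cons (by omega)]
  rw [List.take_append, List.drop_append, htj]
  have h1 : j + 1 - j = 1 := by omega
  rw [h1, List.take_of_length_le (by omega : (cs.take j).length ≤ j + 1),
      List.drop_of_length_le (by omega : (cs.take j).length ≤ j + 1)]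
  have e1 : cs[j + 1]? = some (cs[j + 1]'(by omega)) := List.getElem?_eq_getElem _
  have e2 : cs[j]? = some (cs[j]'(by omega)) := List.getElem?_eq_getElem _
  rw [hdropc, List.take_succ_cons, List.take_zero, List.drop_succ_cons, List.drop_zero]
  simp only [List.nil_append, List.getD, e1, e2, Option.getD_some]
  simp

-- the two loop bodies agree at every in-range index
theorem body_eq (knihovna kam : List String) (cs : List Char) (j : Nat) (hj : j + 1 < cs.length) :
    (match PySem.List.pop? cs (j : Int) with
     | none => kam
     | some (u, t) =>
       pridani_do_seznamu
         (porovnani (String.ofList ((PySem.List.insert t ((j : Int) + 1) u).foldl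
             (fun v k => v ++ [k]) ([] : List Char))) knihovna) kam)
    = (match tlcSearch (String.ofList (cs.take j ++ [cs.getD (j + 1) ' ', cs.getD j ' '] ++ cs.drop (j + 2)))
          knihovna 0 knihovna.length with
       | some w => if w ∈ kam then kam else kam ++ [w]
       | none => kam) := by
  rw [PySem.List.pop?_natCast cs j (by omega)]
  simp only []
  rw [swap_word_eq cs j hj, pridani_eq_match, porovnani_eq_tlcSearch_full]

-- ===== VERDICT (by name: the statement is the Claim_ definition above) =====
theorem two_letter_change_spec : Claim_equal_two_letter_change := by
  intro slovo knihovna kam _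
  show two_letter_change slovo knihovna kam = two_letter_change_alt slovo knihovna kam
  rw [two_letter_change, two_letter_change_alt]
  have hlen : PySem.Str.len slovo = ((slovo.toList.length : Nat) : Int) := by
    simp [pysem]
  rw [hlen, PySem.List.pyRange_one]
  have htn : (((slovo.toList.length : Nat) : Int) - 1 - 0).toNat = slovo.toList.length - 1 := by
    omega
  rw [htn, List.foldl_map]
  apply PySem.List.foldl_congr_mem
  intro acc j hjmem
  have hj : j + 1 < slovo.toList.length := by
    have := List.mem_range.mp hjmem; omega
  have := body_eq knihovna acc slovo.toList j hj
  simpa using this
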